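-- pv_equiv track=rewrite | github.com/mombasawalafaizan/dsa_solution | Stacks, Queues and Heaps/Stacks and Queues/queue_using_stack.py | dequeue1stack
-- ===== SOURCE A (Python) =====
-- def dequeue1stack(s1):
--     if not s1:
--         return -1
--     x = s1.pop()
--     if not s1:
--         return x
--     item = dequeue1stack(s1)
--     s1.append(x)
--     return item
-- ===== SOURCE B (Python) =====
-- def dequeue1stack(s1):
--     if not s1:
--         return -1
--     return s1.pop(0)
-- ===== Notes on version B (the rewrite author's own statement) =====
-- stated objective: simpler
-- what changed: B removes the front element directly with one pop(0) call instead of A's recursion that pops the whole stack off the back and re-appends; same return value and same observable mutation of s1.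
import Mathlib
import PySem

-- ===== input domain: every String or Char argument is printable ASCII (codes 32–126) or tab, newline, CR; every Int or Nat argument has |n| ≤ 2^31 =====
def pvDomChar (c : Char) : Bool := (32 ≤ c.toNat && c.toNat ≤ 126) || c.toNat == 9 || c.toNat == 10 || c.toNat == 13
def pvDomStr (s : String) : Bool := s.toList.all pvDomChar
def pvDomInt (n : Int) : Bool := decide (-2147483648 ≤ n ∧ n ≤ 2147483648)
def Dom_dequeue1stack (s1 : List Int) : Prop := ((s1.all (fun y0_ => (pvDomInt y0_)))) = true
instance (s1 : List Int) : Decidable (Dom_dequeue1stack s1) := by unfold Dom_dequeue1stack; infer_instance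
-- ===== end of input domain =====

-- B replaces A's recursive pop-from-back/re-append dequeue by a direct pop(0) of the front
-- (objective: simpler). Both mutate s1 the same way (front removed); equivalence proved is
-- about the return value.


-- ===== PORT A =====
-- pop() from the back, recurse on the remainder, re-append; return value only.
def dequeue1stack (s1 : List Int) : Int :=
  if h : s1 = [] then -1
  else
    let x := s1.getLast h          -- x = s1.pop()
    let rest := s1.dropLast
    if rest = [] then x
    else dequeue1stack rest        -- item = dequeue1stack(s1); s1.append(x); return item
termination_by s1.length
decreasing_by
  simp only [List.length_dropLast]
  have : s1.length ≠ 0 := fun hl => h (List.eq_nil_of_length_eq_zero hl)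
  omega

-- ===== PORT B =====
-- if not s1: return -1; return s1.pop(0)
def dequeue1stack_alt (s1 : List Int) : Int :=
  match s1 with
  | [] => -1
  | a :: _ => a

-- ===== PRECONDITION & SPEC =====
def Spec_dequeue1stack (s1 : List Int) (out : Int) : Prop := out = dequeue1stack_alt s1
instance (s1 : List Int) (out : Int) : Decidable (Spec_dequeue1stack s1 out) := by unfold Spec_dequeue1stack; infer_instance

-- ===== CLAIM (what is proved, stated in full; the proofs are below) =====
def Claim_equal_dequeue1stack : Prop := ∀ (s1 : List Int), Dom_dequeue1stack s1 → Spec_dequeue1stack s1 (dequeue1stack s1)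

-- ===== LEMMAS AND PROOFS =====

-- A's recursion keeps peeling the last element, so it returns the head.
theorem dequeue1stack_cons (a : Int) (l : List Int) : dequeue1stack (a :: l) = a := by
  induction l using List.reverseRecOn with
  | nil => simp [dequeue1stack]
  | append_singleton m b ih =>
      rw [dequeue1stack]
      rw [show a :: (m ++ [b]) = (a :: m) ++ [b] from rfl, List.dropLast_concat]
      simp [ih]

-- ===== VERDICT (by name: the statement is the Claim_ definition above) =====
theorem dequeue1stack_spec : Claim_equal_dequeue1stack := by
  intro s1 _
  unfold Spec_dequeue1stack
  cases s1 with
  | nil => simp [dequeue1stack, dequeue1stack_alt]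
  | cons a l => rw [dequeue1stack_cons]; rfl
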